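-- pv_equiv track=rewrite | github.com/Tomer27cz/UIDEST | Features/Text/Encode.py | rot_encode
-- ===== SOURCE A (Python) =====
-- def rot_encode(text, s):
--     result = ""
--     exception_list = [' ', '!', '?', '.', ',', ':', ';', "'", '"', '(', ')', '[', ']', '{', '}', '\\', '/', '|', '_', '-', '=', '+', '*', '&', '^', '%', '$', '#', '@', '~', '`', '<', '>', '0', '1', '2', '3', '4', '5', '6', '7', '8', '9']
--     for ch in text:
--         if ch.isascii() and ch not in exception_list:
--             if ch.isupper():
--                 result += chr((ord(ch) + s - 65) % 26 + 65)
--             else: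
--                 result += chr((ord(ch) + s - 97) % 26 + 97)
--         else:
--             result += ch
--     return result
-- ===== SOURCE B (Python) =====
-- def rot_encode(text, s):
--     exceptions = set(" !?.,:;'\"()[]{}\\/|_-=+*&^%$#@~`<>0123456789")
--     table = {}
--     for c in range(128):
--         ch = chr(c)
--         if ch in exceptions:
--             out = ch
--         elif ch.isupper():
--             out = chr((c + s - 65) % 26 + 65)
--         else:
--             out = chr((c + s - 97) % 26 + 97)
--         table[c] = out
--     return text.translate(table)
-- ===== Notes on version B (the rewrite author's own statement) =====
-- stated objective: faster
-- what changed: B precomputes a 128-entry translation table once (exception chars map to themselves, everything else to its rotated letter) and then maps the whole text through it with str.translate in one pass, instead of A's per-character branch-and-concatenate loop.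
import Mathlib
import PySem

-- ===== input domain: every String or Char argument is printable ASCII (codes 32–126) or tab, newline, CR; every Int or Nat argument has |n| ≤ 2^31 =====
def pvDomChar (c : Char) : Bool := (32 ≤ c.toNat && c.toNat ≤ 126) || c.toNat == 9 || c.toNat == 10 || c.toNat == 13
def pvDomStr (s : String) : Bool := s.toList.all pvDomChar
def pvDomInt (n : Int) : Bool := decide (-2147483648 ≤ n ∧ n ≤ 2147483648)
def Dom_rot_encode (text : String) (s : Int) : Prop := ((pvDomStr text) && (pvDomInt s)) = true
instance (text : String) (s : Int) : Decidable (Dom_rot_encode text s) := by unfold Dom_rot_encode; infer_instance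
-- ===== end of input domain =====

-- B builds the full 0..127 translation table once and maps the text through it in one pass
-- (the idiomatic str.translate form); A branches per character. Return values proved equal on Dom.


set_option maxRecDepth 10000

-- ===== PORT A =====
-- A's exception_list, as written
def pvExcA : List Char :=
  [' ', '!', '?', '.', ',', ':', ';', '\'', '"', '(', ')', '[', ']', '{', '}', '\\', '/', '|',
   '_', '-', '=', '+', '*', '&', '^', '%', '$', '#', '@', '~', '`', '<', '>',
   '0', '1', '2', '3', '4', '5', '6', '7', '8', '9']

def rot_encode (text : String) (s : Int) : String :=
  String.mk (text.toList.foldl (fun result ch =>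
    if decide (ch.toNat ≤ 127) && !(pvExcA.contains ch) then
      if PySem.Chars.isupper ch then
        result ++ [Char.ofNat ((PySem.Int.mod ((ch.toNat : Int) + s - 65) 26 + 65).toNat)]
      else
        result ++ [Char.ofNat ((PySem.Int.mod ((ch.toNat : Int) + s - 97) 26 + 97).toNat)]
    else result ++ [ch]) [])

-- ===== PORT B =====
-- B's exception set
def pvExcB : PySem.Set Char :=
  PySem.Set.ofList " !?.,:;'\"()[]{}\\/|_-=+*&^%$#@~`<>0123456789".toList

-- value stored in the table at codepoint c (the body of Source B's table-building loop)
def pvTblVal (s : Int) (c : Int) : Char :=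
  let ch := Char.ofNat c.toNat
  if PySem.Set.contains pvExcB ch then ch
  else if PySem.Chars.isupper ch then
    Char.ofNat ((PySem.Int.mod (c + s - 65) 26 + 65).toNat)
  else
    Char.ofNat ((PySem.Int.mod (c + s - 97) 26 + 97).toNat)

def rot_encode_alt (text : String) (s : Int) : String :=
  let table : PySem.Dict Int Char :=
    (PySem.List.pyRange 0 128 1).foldl (fun d c => d.insert c (pvTblVal s c)) PySem.Dict.empty
  String.mk (text.toList.map (fun ch => ((table.get? (ch.toNat : Int)).getD ch)))

-- ===== PRECONDITION & SPEC =====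
def Spec_rot_encode (text : String) (s : Int) (out : String) : Prop := out = rot_encode_alt text s
instance (text : String) (s : Int) (out : String) : Decidable (Spec_rot_encode text s out) := by unfold Spec_rot_encode; infer_instance

-- ===== CLAIM (what is proved, stated in full; the proofs are below) =====
def Claim_equal_rot_encode : Prop := ∀ (text : String) (s : Int), Dom_rot_encode text s → Spec_rot_encode text s (rot_encode text s)

-- ===== LEMMAS AND PROOFS =====

-- lookup in a dict built by inserting (c, g c) for every c of a list
lemma pvGet_foldl_insert (g : Int → Char) (l : List Int) (d : PySem.Dict Int Char) (k : Int) :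
    (l.foldl (fun d c => d.insert c (g c)) d).get? k
      = if k ∈ l then some (g k) else d.get? k := by
  induction l generalizing d with
  | nil => simp
  | cons c t ih =>
    simp only [List.foldl_cons, ih, List.mem_cons]
    by_cases hkt : k ∈ t
    · simp [hkt]
    · by_cases hkc : k = c
      · subst hkc; simp [hkt, PySem.Dict.get?_insert_self]
      · simp [hkt, hkc, PySem.Dict.get?_insert_of_ne _ _ hkc]

-- the per-character function B applies
lemma pvAlt_char (s : Int) (ch : Char) :
    ((((PySem.List.pyRange 0 128 1).foldl (fun d c => d.insert c (pvTblVal s c))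
        PySem.Dict.empty).get? (ch.toNat : Int)).getD ch)
      = if ch.toNat ≤ 127 then pvTblVal s (ch.toNat : Int) else ch := by
  rw [pvGet_foldl_insert]
  by_cases h : ch.toNat ≤ 127
  · have : (ch.toNat : Int) ∈ PySem.List.pyRange 0 128 1 := by
      rw [PySem.List.mem_pyRange_one]; omega
    simp [this, h]
  · have : ¬ (ch.toNat : Int) ∈ PySem.List.pyRange 0 128 1 := by
      rw [PySem.List.mem_pyRange_one]; omega
    simp [this, h, PySem.Dict.get?_empty]

lemma pvExc_eq : pvExcB = pvExcA := by decide

lemma pvOfNat_toNat (ch : Char) : Char.ofNat ch.toNat = ch := Char.ofNat_toNat ch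

-- per-character agreement of the two programs
lemma pvStep_eq (s : Int) (ch : Char) :
    (if decide (ch.toNat ≤ 127) && !(pvExcA.contains ch) then
      if PySem.Chars.isupper ch then
        Char.ofNat ((PySem.Int.mod ((ch.toNat : Int) + s - 65) 26 + 65).toNat)
      else
        Char.ofNat ((PySem.Int.mod ((ch.toNat : Int) + s - 97) 26 + 97).toNat)
    else ch)
      = if ch.toNat ≤ 127 then pvTblVal s (ch.toNat : Int) else ch := by
  have hc : (((ch.toNat : Int)).toNat) = ch.toNat := by omega
  by_cases h : ch.toNat ≤ 127
  · simp only [pvTblVal, pvExc_eq, hc, pvOfNat_toNat, h, decide_true, Bool.true_and, if_true,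
      PySem.Set.contains_eq_listContains]
    by_cases hm : pvExcA.contains ch <;> simp only [hm, Bool.not_true, Bool.not_false,
      Bool.and_true, Bool.and_false, decide_true, if_true, if_false, Bool.false_eq_true] <;> simp [hm]
  · simp [h]

-- an append-only foldl is a map
lemma pvFoldl_append (g : Char → Char) (l acc : List Char) :
    (l.foldl (fun r ch => r ++ [g ch]) acc) = acc ++ l.map g := by
  induction l generalizing acc with
  | nil => simp
  | cons c t ih => simp [ih]

-- A's loop body appends exactly one character per step
lemma pvA_body (s : Int) :
    (fun (result : List Char) ch =>
      if decide (ch.toNat ≤ 127) && !(pvExcA.contains ch) then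
        if PySem.Chars.isupper ch then
          result ++ [Char.ofNat ((PySem.Int.mod ((ch.toNat : Int) + s - 65) 26 + 65).toNat)]
        else
          result ++ [Char.ofNat ((PySem.Int.mod ((ch.toNat : Int) + s - 97) 26 + 97).toNat)]
      else result ++ [ch])
    = fun (result : List Char) ch => result ++
        [if decide (ch.toNat ≤ 127) && !(pvExcA.contains ch) then
          if PySem.Chars.isupper ch then
            Char.ofNat ((PySem.Int.mod ((ch.toNat : Int) + s - 65) 26 + 65).toNat)
          else
            Char.ofNat ((PySem.Int.mod ((ch.toNat : Int) + s - 97) 26 + 97).toNat)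
        else ch] := by
  funext result ch
  cases h1 : (decide (ch.toNat ≤ 127) && !(pvExcA.contains ch)) <;>
    cases h2 : PySem.Chars.isupper ch <;>
      simp only [h1, h2, Bool.false_eq_true, if_false, if_true]

-- ===== VERDICT (by name: the statement is the Claim_ definition above) =====
theorem rot_encode_spec : Claim_equal_rot_encode := by
  intro text s _
  unfold Spec_rot_encode rot_encode rot_encode_alt
  rw [pvA_body, pvFoldl_append]
  simp only [List.nil_append]
  refine congrArg String.mk ?_
  apply List.map_congr_left
  intro ch _
  rw [pvAlt_char]
  exact pvStep_eq s ch
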